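-- pv_equiv track=rewrite | github.com/rahidzeynal/PythonCodingBat | Logic-2/lone_sum.py | lone_sum
-- ===== SOURCE A (Python) =====
-- def lone_sum(a, b, c):
--   l = [a, b, c]
--   if a == b == c:
--     return 0
--   else:
--     ls = sum(l)
--     result = []
--     for i in l:
--       if i not in result:
--         result.append(i)
--     dls = sum(result)
--     return dls - (ls - dls)
-- ===== SOURCE B (Python) =====
-- def lone_sum(a, b, c):
--     l = [a, b, c]
--     return sum(x for x in l if l.count(x) == 1)
-- ===== Notes on version B (the rewrite author's own statement) =====
-- stated objective: idiomatic
-- what changed: Replaces the dedup-loop and the 2*distinct_sum - total_sum arithmetic identity (plus the all-equal special case) with a direct filter: sum the values whose occurrence count in the triple is exactly 1.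
import Mathlib
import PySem

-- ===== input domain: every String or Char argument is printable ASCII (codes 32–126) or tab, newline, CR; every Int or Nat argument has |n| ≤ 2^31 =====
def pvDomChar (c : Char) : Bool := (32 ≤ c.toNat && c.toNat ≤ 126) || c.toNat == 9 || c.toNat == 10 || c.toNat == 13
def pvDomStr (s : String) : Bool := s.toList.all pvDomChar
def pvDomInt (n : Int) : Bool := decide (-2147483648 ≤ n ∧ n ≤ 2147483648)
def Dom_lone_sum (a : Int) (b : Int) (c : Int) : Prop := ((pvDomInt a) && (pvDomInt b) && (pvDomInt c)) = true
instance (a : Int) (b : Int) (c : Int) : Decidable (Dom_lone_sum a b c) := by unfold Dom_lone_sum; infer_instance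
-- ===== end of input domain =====

-- B replaces A's dedup-loop + 2*distinct_sum - total_sum trick with a direct count-based filter (idiomatic; same cost).


-- ===== PORT A =====
-- Port of A: dedup loop + 2*dls - ls identity, all-equal special case.
def lone_sum (a : Int) (b : Int) (c : Int) : Int :=
  let l := [a, b, c]
  if a = b ∧ b = c then 0
  else
    let ls := l.sum
    let result := l.foldl (fun r i => if i ∈ r then r else r ++ [i]) []
    let dls := result.sum
    dls - (ls - dls)

-- ===== PORT B =====
-- Port of B: sum of the values occurring exactly once in the triple.
def lone_sum_alt (a : Int) (b : Int) (c : Int) : Int :=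
  let l := [a, b, c]
  (l.filter (fun x => l.count x == 1)).sum

-- ===== PRECONDITION & SPEC =====
def Spec_lone_sum (a : Int) (b : Int) (c : Int) (out : Int) : Prop := out = lone_sum_alt a b c
instance (a : Int) (b : Int) (c : Int) (out : Int) : Decidable (Spec_lone_sum a b c out) := by unfold Spec_lone_sum; infer_instance

-- ===== CLAIM (what is proved, stated in full; the proofs are below) =====
def Claim_equal_lone_sum : Prop := ∀ (a : Int) (b : Int) (c : Int), Dom_lone_sum a b c → Spec_lone_sum a b c (lone_sum a b c)

-- ===== LEMMAS AND PROOFS =====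

-- ===== VERDICT (by name: the statement is the Claim_ definition above) =====
theorem lone_sum_spec : Claim_equal_lone_sum := by
  intro a b c _
  unfold Spec_lone_sum lone_sum lone_sum_alt
  by_cases hab : a = b
  · by_cases hbc : b = c
    · subst hab; subst hbc; simp
    · subst hab; simp [hbc, Ne.symm hbc]
  · by_cases hbc : b = c
    · subst hbc; simp [hab, Ne.symm hab]
    · by_cases hac : a = c
      · subst hac; simp [hab, hbc]
      · simp [hab, hbc, hac, Ne.symm hab, Ne.symm hbc, Ne.symm hac]
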